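-- pv_equiv track=rewrite | github.com/iianTP/git-atv2 | count_symmetric_numbers.py | sym
-- ===== SOURCE A (Python) =====
-- def sym(low,high):
--     def num_len(n):
--         return len(str(n))
--
--     count = 0
--     for n in range(low,high+1):
--         if num_len(n)%2==0:
--             s = str(n)
--             mid = len(str(n))//2
--             sumL = sum(int(digit) for digit in s[:mid])
--             sumR = sum(int(digit) for digit in s[mid:])
--             if sumL == sumR:
--                 count += 1
--     return count
-- ===== SOURCE B (Python) =====
-- def sym(low, high):
--     # Counts n in [low, high] whose decimal representation has even length and
--     # equal digit sums in both halves.  Instead of scanning every n, count per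
--     # even length 2m as prefix difference F(high) - F(max(low,0)-1), tallying
--     # right halves by digit sum once and looking each left half up in that tally.
--     if high < low:
--         return 0
--
--     def digsum(n):
--         s = 0
--         while n > 0:
--             s += n % 10
--             n //= 10
--         return s
--
--     def count_upto(x):
--         # number of symmetric numbers in [0..x]
--         total = 0
--         m = 1
--         while 10 ** (2 * m - 1) <= x:
--             half = 10 ** m
--             y = min(x, half * half - 1)
--             by_sum = {}
--             for r in range(half):
--                 s = digsum(r)
--                 by_sum[s] = by_sum.get(s, 0) + 1
--             lmax = y // half
--             for left in range(half // 10, lmax):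
--                 total += by_sum.get(digsum(left), 0)
--             target = digsum(lmax)
--             for r in range(y % half + 1):
--                 if digsum(r) == target:
--                     total += 1
--             m += 1
--         return total
--
--     return count_upto(high) - count_upto(max(low, 0) - 1)
-- ===== Notes on version B (the rewrite author's own statement) =====
-- stated objective: faster
-- what changed: Instead of scanning every n in [low,high] and summing string digit halves, B counts by prefix difference F(high)-F(max(low,0)-1), where F tallies, per even digit length 2m, the 10^m right halves by digit sum once (a dict) and looks each left half up in that tally, visiting only O(sqrt(high)) numbers.
import Mathlib
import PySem

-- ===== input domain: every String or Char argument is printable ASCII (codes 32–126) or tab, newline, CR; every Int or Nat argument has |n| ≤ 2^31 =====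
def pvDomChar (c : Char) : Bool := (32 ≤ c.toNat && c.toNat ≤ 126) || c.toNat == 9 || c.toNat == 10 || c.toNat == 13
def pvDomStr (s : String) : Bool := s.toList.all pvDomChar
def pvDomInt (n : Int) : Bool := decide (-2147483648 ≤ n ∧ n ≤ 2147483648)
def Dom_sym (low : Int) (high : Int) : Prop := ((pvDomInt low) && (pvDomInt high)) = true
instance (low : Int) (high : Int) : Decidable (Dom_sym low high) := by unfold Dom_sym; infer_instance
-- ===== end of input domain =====

-- B replaces A's per-number scan of [low,high] with per-even-length prefix counting
-- (tally right halves by digit sum once, look every left half up); measured faster on large ranges.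

-- ===== PORT A =====
-- int(digit) for a one-character string; exact whenever Python's int() succeeds
-- (under Pre_sym every character this is applied to is an ASCII digit).
def symDigitVal (c : Char) : Int := (PySem.Int.ofChars? [c]).getD 0

-- sum(int(digit) for digit in cs)
def symSum (cs : List Char) : Int := cs.foldl (fun acc c => acc + symDigitVal c) 0

def sym (low : Int) (high : Int) : Int :=
  (PySem.List.pyRange low (high + 1)).foldl (fun count n =>
    if PySem.Int.mod (PySem.Str.len (PySem.Int.toStr n)) 2 == 0 then
      -- s = str(n), iterated/sliced over its characters (toList)
      let s := (PySem.Int.toStr n).toList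
      let mid := PySem.Int.floordiv (PySem.Str.len (PySem.Int.toStr n)) 2
      let sumL := symSum (PySem.List.slice s none (some mid))
      let sumR := symSum (PySem.List.slice s (some mid) none)
      if sumL == sumR then count + 1 else count
    else count) 0

-- ===== PORT B =====
-- digsum: while n > 0: s += n % 10; n //= 10
def altDigsum (s : Int) (n : Int) : Int :=
  if h : 0 < n then altDigsum (s + PySem.Int.mod n 10) (PySem.Int.floordiv n 10) else s
termination_by n.toNat
decreasing_by
  have he : n.fdiv 10 = n / 10 := by
    rw [Int.fdiv_eq_ediv]
    simp
  have hlt : n / 10 < n := by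
    have h1 := Int.ediv_le_self 10 (le_of_lt h)
    have h2 : n / 10 * 10 ≤ n := Int.ediv_mul_le n (by norm_num)
    omega
  have hnn : 0 ≤ n / 10 := Int.ediv_nonneg (le_of_lt h) (by norm_num)
  simp only [PySem.Int.floordiv, he]
  omega

-- the while-loop over m in count_upto
def altBlocks (x : Int) (m : Nat) (total : Int) : Int :=
  if h : (10:Int) ^ (2 * m - 1) ≤ x then
    let half : Int := 10 ^ m
    let y := min x (half * half - 1)
    let bySum := (PySem.List.pyRange 0 half).foldl
      (fun d r => let s := altDigsum 0 r; d.insert s (d.getD s 0 + 1))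
      (PySem.Dict.empty : PySem.Dict Int Int)
    let lmax := PySem.Int.floordiv y half
    let total1 := (PySem.List.pyRange (PySem.Int.floordiv half 10) lmax).foldl
      (fun t left => t + bySum.getD (altDigsum 0 left) 0) total
    let target := altDigsum 0 lmax
    let total2 := (PySem.List.pyRange 0 (PySem.Int.mod y half + 1)).foldl
      (fun t r => if altDigsum 0 r == target then t + 1 else t) total1
    altBlocks x (m + 1) total2
  else total
termination_by (x + 1 - 10 ^ (2 * m - 1)).toNat
decreasing_by
  have hpow : (10:Int) ^ (2 * m - 1) < 10 ^ (2 * (m + 1) - 1) := by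
    apply pow_lt_pow_right₀ (by norm_num)
    omega
  omega

def altCountUpto (x : Int) : Int := altBlocks x 1 0

def sym_alt (low : Int) (high : Int) : Int :=
  if high < low then 0
  else altCountUpto high - altCountUpto (max low 0 - 1)

-- ===== PRECONDITION & SPEC =====
-- Pre_sym excludes exactly the inputs on which A raises ValueError: ranges containing a
-- negative number whose str() has even length (then int('-') is reached).
def Pre_sym (low : Int) (high : Int) : Prop :=
  ¬(low ≤ -1 ∧ -9 ≤ high ∧ low ≤ high) ∧
  ¬(low ≤ -100 ∧ -999 ≤ high ∧ low ≤ high) ∧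
  ¬(low ≤ -10000 ∧ -99999 ≤ high ∧ low ≤ high) ∧
  ¬(low ≤ -1000000 ∧ -9999999 ≤ high ∧ low ≤ high) ∧
  ¬(low ≤ -100000000 ∧ -999999999 ≤ high ∧ low ≤ high)
instance (low : Int) (high : Int) : Decidable (Pre_sym low high) := by unfold Pre_sym; infer_instance

def pvWitness_sym : Int × Int := (1, 100)

def Spec_sym (low : Int) (high : Int) (out : Int) : Prop := out = sym_alt low high
instance (low : Int) (high : Int) (out : Int) : Decidable (Spec_sym low high out) := by unfold Spec_sym; infer_instance

-- ===== CLAIM (what is proved, stated in full; the proofs are below) =====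
def Claim_equal_sym : Prop := ∀ (low : Int) (high : Int), Dom_sym low high → Pre_sym low high → Spec_sym low high (sym low high)

-- ===== LEMMAS AND PROOFS =====

-- digit sum / digit length over Nat.digits 10
def natDS (k : Nat) : Nat := (Nat.digits 10 k).sum
def dlen (k : Nat) : Nat := (Nat.digits 10 k).length

-- A's per-element test, extracted
def symTest (n : Int) : Bool :=
  if PySem.Int.mod (PySem.Str.len (PySem.Int.toStr n)) 2 == 0 then
    let s := (PySem.Int.toStr n).toList
    let mid := PySem.Int.floordiv (PySem.Str.len (PySem.Int.toStr n)) 2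
    symSum (PySem.List.slice s none (some mid)) == symSum (PySem.List.slice s (some mid) none)
  else false

-- B's arithmetic symmetric test
def isSymN (k : Nat) : Bool :=
  decide (0 < k) && (dlen k % 2 == 0) &&
    decide (natDS (k / 10 ^ (dlen k / 2)) = natDS (k % 10 ^ (dlen k / 2)))

theorem sym_eq_countP (low high : Int) :
    sym low high = ((PySem.List.pyRange low (high + 1)).countP symTest : Int) := by
  unfold sym
  rw [PySem.List.foldl_congr_mem _ _ (fun count n => if symTest n then count + 1 else count) 0
    (by
      intro acc n _
      simp only [symTest]
      by_cases h1 : PySem.Int.mod (PySem.Str.len (PySem.Int.toStr n)) 2 == 0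
      · simp only [h1, if_true]
      · simp only [h1, if_false, Bool.false_eq_true])]
  rw [PySem.List.foldl_if_add_one]
  simp

theorem toDigitsCore10 (f : Nat) : ∀ (n : Nat) (acc : List Char), n ≠ 0 → n < f →
    Nat.toDigitsCore 10 f n acc = ((Nat.digits 10 n).map Nat.digitChar).reverse ++ acc := by
  induction f with
  | zero => intro n acc hn hf; omega
  | succ f ih =>
    intro n acc hn hf
    rw [Nat.toDigitsCore]
    have hd : Nat.digits 10 n = n % 10 :: Nat.digits 10 (n / 10) :=
      Nat.digits_def' (by norm_num) (Nat.pos_of_ne_zero hn)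
    by_cases h : n / 10 = 0
    · simp [h, hd]
    · have hlt : n / 10 < n := Nat.div_lt_self (Nat.pos_of_ne_zero hn) (by norm_num)
      simp only [h, if_false]
      rw [ih (n / 10) _ h (by omega), hd]
      simp

theorem toDigits10_eq (k : Nat) (hk : k ≠ 0) :
    Nat.toDigits 10 k = ((Nat.digits 10 k).map Nat.digitChar).reverse := by
  have := toDigitsCore10 (k + 1) k [] hk (by omega)
  simpa [Nat.toDigits] using this

theorem symDigitVal_digitChar (d : Nat) (hd : d < 10) :
    symDigitVal (Nat.digitChar d) = (d : Int) := by
  interval_cases d <;> decide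

theorem symSum_eq (cs : List Char) : symSum cs = (cs.map symDigitVal).sum := by
  unfold symSum
  rw [PySem.List.foldl_add]
  simp

theorem dlen_lt (k : Nat) : k < 10 ^ dlen k := Nat.lt_base_pow_length_digits (by norm_num)

theorem dlen_pos (k : Nat) (hk : k ≠ 0) : 0 < dlen k := by
  unfold dlen
  simpa [List.length_pos_iff] using Nat.digits_ne_nil_iff_ne_zero.mpr hk

theorem dlen_pow_le (k : Nat) (hk : k ≠ 0) : 10 ^ (dlen k - 1) ≤ k := by
  have h := Nat.base_pow_length_digits_le 10 k (by norm_num) hk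
  have h1 : 0 < dlen k := dlen_pos k hk
  have h2 : (10:Nat) ^ dlen k = 10 * 10 ^ (dlen k - 1) := by
    conv_lhs => rw [show dlen k = (dlen k - 1) + 1 by omega]
    rw [pow_succ]
    ring
  unfold dlen at *
  omega

theorem dlen_le_iff (k d : Nat) : dlen k ≤ d ↔ k < 10 ^ d := by
  constructor
  · intro h
    exact lt_of_lt_of_le (dlen_lt k) (Nat.pow_le_pow_right (by norm_num) h)
  · intro h
    by_contra hc
    push_neg at hc
    have hk : k ≠ 0 := by
      intro h0
      rw [h0] at hc
      simp [dlen] at hc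
    have := dlen_pow_le k hk
    have : (10:Nat) ^ d ≤ 10 ^ (dlen k - 1) := Nat.pow_le_pow_right (by norm_num) (by omega)
    omega

theorem dlen_eq_of (k d : Nat) (hd : 0 < d) (h1 : 10 ^ (d - 1) ≤ k) (h2 : k < 10 ^ d) :
    dlen k = d := by
  have ha : dlen k ≤ d := (dlen_le_iff k d).mpr h2
  have hb : ¬ dlen k ≤ d - 1 := by
    rw [dlen_le_iff]
    omega
  omega

theorem natDS_step (k : Nat) (hk : 0 < k) : natDS k = k % 10 + natDS (k / 10) := by
  unfold natDS
  rw [Nat.digits_def' (by norm_num : (1:Nat) < 10) hk]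
  simp

theorem altDigsum_eq (s n : Int) (hn : 0 ≤ n) : altDigsum s n = s + (natDS n.toNat : Int) := by
  rw [altDigsum]
  by_cases h : 0 < n
  · have he : n.fdiv 10 = n / 10 := by rw [Int.fdiv_eq_ediv]; simp
    have hm : n.fmod 10 = n % 10 := by rw [Int.fmod_eq_emod]; simp
    have hlt : n / 10 < n := by
      have h1 := Int.ediv_le_self 10 (le_of_lt h)
      have h2 : n / 10 * 10 ≤ n := Int.ediv_mul_le n (by norm_num)
      omega
    have hnn : 0 ≤ n / 10 := Int.ediv_nonneg hn (by norm_num)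
    have ih := altDigsum_eq (s + PySem.Int.mod n 10) (PySem.Int.floordiv n 10)
      (by simpa [PySem.Int.floordiv, he] using hnn)
    rw [dif_pos h, ih]
    have hstep := natDS_step n.toNat (by omega)
    have hdiv : (n / 10).toNat = n.toNat / 10 := by
      omega
    have hmod : PySem.Int.mod n 10 = ((n.toNat % 10 : Nat) : Int) := by
      simp only [PySem.Int.mod, hm]
      omega
    simp only [PySem.Int.floordiv, he, hdiv, hmod]
    push_cast
    omega
  · rw [dif_neg h]
    have : n = 0 := by omega
    subst this
    simp [natDS]
termination_by n.toNat
decreasing_by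
  simp only [PySem.Int.floordiv, he]
  omega

theorem row_dlen (m L R : Nat) (hm : 1 ≤ m) (hL1 : 10 ^ (m - 1) ≤ L) (hL2 : L < 10 ^ m)
    (hR : R < 10 ^ m) : dlen (10 ^ m * L + R) = 2 * m := by
  apply dlen_eq_of _ _ (by omega)
  · have : (10:Nat) ^ (2 * m - 1) = 10 ^ m * 10 ^ (m - 1) := by
      rw [← pow_add]
      congr 1
      omega
    calc (10:Nat) ^ (2 * m - 1) = 10 ^ m * 10 ^ (m - 1) := this
      _ ≤ 10 ^ m * L := Nat.mul_le_mul_left _ hL1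
      _ ≤ 10 ^ m * L + R := Nat.le_add_right _ _
  · have : (10:Nat) ^ (2 * m) = 10 ^ m * 10 ^ m := by rw [← pow_add]; congr 1; omega
    have hL2' : L + 1 ≤ 10 ^ m := hL2
    calc 10 ^ m * L + R < 10 ^ m * L + 10 ^ m := by omega
      _ = 10 ^ m * (L + 1) := by ring
      _ ≤ 10 ^ m * 10 ^ m := Nat.mul_le_mul_left _ hL2'
      _ = 10 ^ (2 * m) := this.symm

theorem isSymN_row (m L R : Nat) (hm : 1 ≤ m) (hL1 : 10 ^ (m - 1) ≤ L) (hL2 : L < 10 ^ m)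
    (hR : R < 10 ^ m) : isSymN (10 ^ m * L + R) = decide (natDS L = natDS R) := by
  have hd := row_dlen m L R hm hL1 hL2 hR
  have hLpos : 0 < L := lt_of_lt_of_le (by positivity : 0 < (10:Nat) ^ (m-1)) hL1
  have hpos : 0 < 10 ^ m * L + R := by positivity
  have hdiv : (10 ^ m * L + R) / 10 ^ m = L := by
    rw [Nat.mul_add_div (by positivity)]
    simp [Nat.div_eq_of_lt hR]
  have hmod : (10 ^ m * L + R) % 10 ^ m = R := by
    rw [Nat.mul_add_mod]
    exact Nat.mod_eq_of_lt hR
  unfold isSymN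
  rw [hd]
  have h2 : 2 * m % 2 = 0 := by omega
  have h3 : 2 * m / 2 = m := by omega
  rw [h2, h3, hdiv, hmod]
  simp [hpos]

theorem isSymN_odd (k : Nat) (h : dlen k % 2 = 1) : isSymN k = false := by
  unfold isSymN
  rw [h]
  simp

theorem symSum_digits (l : List Nat) (h : ∀ x ∈ l, x < 10) :
    symSum ((l.map Nat.digitChar).reverse) = (l.sum : Int) := by
  rw [symSum_eq, List.map_reverse, List.sum_reverse, List.map_map]
  have : l.map (symDigitVal ∘ Nat.digitChar) = l.map (Nat.cast : Nat → Int) := by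
    apply List.map_congr_left
    intro x hx
    exact symDigitVal_digitChar x (h x hx)
  rw [this]
  exact (Nat.cast_list_sum l).symm

theorem symSum_zeroPad (p : Nat) (l : List Nat) (h : ∀ x ∈ l, x < 10) :
    symSum (List.replicate p '0' ++ (l.map Nat.digitChar).reverse) = (l.sum : Int) := by
  rw [symSum_eq, List.map_append, List.sum_append]
  have hz : symDigitVal '0' = 0 := by decide
  have h0 : (List.replicate p '0').map symDigitVal = List.replicate p (0 : Int) := by
    rw [List.map_replicate, hz]
  rw [h0]
  have h2 := symSum_digits l h
  rw [symSum_eq] at h2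
  rw [h2]
  simp

theorem symTest_zero : symTest 0 = isSymN 0 := by decide

theorem symTest_pos (n : Int) (hn : 0 ≤ n) : symTest n = isSymN n.toNat := by
  rcases Int.eq_ofNat_of_zero_le hn with ⟨k, rfl⟩
  rw [Int.toNat_natCast]
  rcases Nat.eq_zero_or_pos k with rfl | hk0
  · exact symTest_zero
  have hk : k ≠ 0 := by omega
  have hchars : (PySem.Int.toStr (k : Int)).toList = Nat.toDigits 10 k := by
    rw [PySem.Int.toList_toStr]
    unfold PySem.Int.toChars
    rw [if_neg (by omega)]
    norm_num
  have hlen0 : (Nat.toDigits 10 k).length = dlen k := by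
    rw [toDigits10_eq k hk]
    simp [dlen]
  have hlen : PySem.Str.len (PySem.Int.toStr (k : Int)) = (dlen k : Int) := by
    rw [PySem.Str.len_eq, hchars, hlen0]
  unfold symTest isSymN
  rw [hlen, hchars]
  have hmod2 : (PySem.Int.mod (dlen k : Int) 2 == 0) = (dlen k % 2 == 0) := by
    simp only [PySem.Int.mod, Int.fmod_eq_emod]
    by_cases h : dlen k % 2 = 0
    · have h1 : (dlen k : Int) % 2 = 0 := by omega
      simp [h1, h]
    · have h1 : ¬ (dlen k : Int) % 2 = 0 := by omega
      simp [h1, h]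
  rw [hmod2]
  by_cases hpar : dlen k % 2 = 0
  case neg =>
    have : (dlen k % 2 == 0) = false := by simp [hpar]
    rw [this]
    simp
  case pos =>
    have hpar' : (dlen k % 2 == 0) = true := by simp [hpar]
    rw [hpar']
    simp only [if_true, decide_eq_true_eq, Bool.true_and]
    set m := dlen k / 2 with hm
    have hd2 : dlen k = 2 * m := by omega
    have hm1 : 1 ≤ m := by
      have := dlen_pos k hk
      omega
    have hmid : PySem.Int.floordiv (dlen k : Int) 2 = (m : Int) := by
      have he : ((dlen k : Int)).fdiv 2 = (dlen k : Int) / 2 := by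
        rw [Int.fdiv_eq_ediv]
        simp
      simp only [PySem.Int.floordiv, he]
      omega
    rw [hmid]
    -- decompose k into halves
    set L := k / 10 ^ m with hL
    set R := k % 10 ^ m with hR
    have hRlt : R < 10 ^ m := Nat.mod_lt _ (by positivity)
    have hkeq : 10 ^ m * L + R = k := Nat.div_add_mod k (10 ^ m)
    have hklt : k < 10 ^ (2 * m) := by rw [← hd2]; exact dlen_lt k
    have hkge : 10 ^ (2 * m - 1) ≤ k := by
      have := dlen_pow_le k hk
      rw [hd2] at this
      exact this
    have hLge : 10 ^ (m - 1) ≤ L := by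
      rw [hL, Nat.le_div_iff_mul_le (by positivity)]
      calc 10 ^ (m - 1) * 10 ^ m = 10 ^ (2 * m - 1) := by rw [← pow_add]; congr 1; omega
        _ ≤ k := hkge
    have hLlt : L < 10 ^ m := by
      rw [hL, Nat.div_lt_iff_lt_mul (by positivity)]
      calc k < 10 ^ (2 * m) := hklt
        _ = 10 ^ m * 10 ^ m := by rw [← pow_add]; congr 1; omega
    have hLpos : 0 < L := lt_of_lt_of_le (by positivity : 0 < (10:Nat) ^ (m - 1)) hLge
    have hdR : dlen R ≤ m := (dlen_le_iff R m).mpr hRlt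
    have hsplit : Nat.digits 10 k
        = Nat.digits 10 R ++ List.replicate (m - dlen R) 0 ++ Nat.digits 10 L := by
      have h := Nat.digits_append_zeroes_append_digits (b := 10) (k := m - dlen R)
        (m := L) (n := R) (by norm_num) hLpos
      have hexp : (Nat.digits 10 R).length + (m - dlen R) = m := by
        show dlen R + (m - dlen R) = m
        omega
      rw [hexp] at h
      rw [h]
      congr 1
      omega
    have hdL : dlen L = m := dlen_eq_of L m (by omega) hLge hLlt
    have hdig : Nat.toDigits 10 k
        = ((Nat.digits 10 L).map Nat.digitChar).reverse
          ++ (List.replicate (m - dlen R) '0'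
          ++ ((Nat.digits 10 R).map Nat.digitChar).reverse) := by
      rw [toDigits10_eq k hk, hsplit]
      simp [List.reverse_append, List.map_replicate]
      exact Or.inr rfl
    have hlenL : (((Nat.digits 10 L).map Nat.digitChar).reverse).length = m := by
      simpa [dlen] using hdL
    have hsliceL : PySem.List.slice (Nat.toDigits 10 k) none (some (m : Int))
        = ((Nat.digits 10 L).map Nat.digitChar).reverse := by
      rw [PySem.List.slice_to _ (by positivity), Int.toNat_natCast, hdig]
      rw [List.take_append_of_le_length (le_of_eq hlenL.symm), List.take_of_length_le (le_of_eq hlenL)]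
    have hsliceR : PySem.List.slice (Nat.toDigits 10 k) (some (m : Int)) none
        = List.replicate (m - dlen R) '0' ++ ((Nat.digits 10 R).map Nat.digitChar).reverse := by
      rw [PySem.List.slice_from _ (by positivity), Int.toNat_natCast, hdig]
      rw [List.drop_append_of_le_length (le_of_eq hlenL.symm), List.drop_of_length_le (le_of_eq hlenL)]
      simp
    rw [hsliceL, hsliceR]
    have hltL : ∀ x ∈ Nat.digits 10 L, x < 10 := fun x hx => Nat.digits_lt_base (by norm_num) hx
    have hltR : ∀ x ∈ Nat.digits 10 R, x < 10 := fun x hx => Nat.digits_lt_base (by norm_num) hx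
    rw [symSum_digits _ hltL, symSum_zeroPad _ _ hltR]
    show (((natDS L : Int)) == (natDS R : Int))
        = (decide (0 < k) && true && decide (natDS (k / 10 ^ m) = natDS (k % 10 ^ m)))
    rw [← hL, ← hR]
    by_cases h : natDS L = natDS R
    · simp [h, hk0]
    · simp [h, hk0]

theorem symTest_neg_even (n : Int) (hn : n < 0) (h : dlen n.natAbs % 2 = 0) :
    symTest n = false := by
  have hk0 : n.natAbs ≠ 0 := by omega
  have hchars : (PySem.Int.toStr n).toList = '-' :: Nat.toDigits 10 n.natAbs := by
    rw [PySem.Int.toList_toStr]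
    unfold PySem.Int.toChars
    rw [if_pos hn]
  have hlen0 : (Nat.toDigits 10 n.natAbs).length = dlen n.natAbs := by
    rw [toDigits10_eq _ hk0]
    simp [dlen]
  have hlen : PySem.Str.len (PySem.Int.toStr n) = (dlen n.natAbs : Int) + 1 := by
    rw [PySem.Str.len_eq, hchars]
    simp [hlen0]
  unfold symTest
  rw [hlen]
  have hmodd : (PySem.Int.mod ((dlen n.natAbs : Int) + 1) 2 == 0) = false := by
    simp only [PySem.Int.mod, Int.fmod_eq_emod]
    have h1 : ((dlen n.natAbs : Int) + 1) % 2 = 1 := by omega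
    simp [h1]
  rw [hmodd]
  simp

-- boolean test used on the B side
def Psym (n : Int) : Bool := isSymN n.toNat

theorem pyRange_shift (c t : Int) :
    PySem.List.pyRange c (c + t) = (PySem.List.pyRange 0 t).map (fun r => c + r) := by
  rw [PySem.List.pyRange_one, PySem.List.pyRange_one]
  simp [List.map_map]

theorem countP_zone (j : Nat) (a b : Int) (ha : ((10:Int) ^ (2 * j)) ≤ a)
    (hb : b ≤ (10:Int) ^ (2 * j + 1)) :
    (PySem.List.pyRange a b).countP Psym = 0 := by
  rw [List.countP_eq_zero]
  intro n hn
  rw [PySem.List.mem_pyRange_one] at hn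
  have hc1 : (((10:Nat) ^ (2 * j) : Nat) : Int) = (10:Int) ^ (2 * j) := by push_cast; ring
  have hc2 : (((10:Nat) ^ (2 * j + 1) : Nat) : Int) = (10:Int) ^ (2 * j + 1) := by push_cast; ring
  have h1 : 10 ^ (2 * j) ≤ n.toNat := by omega
  have h2 : n.toNat < 10 ^ (2 * j + 1) := by omega
  have hd : dlen n.toNat = 2 * j + 1 := by
    apply dlen_eq_of _ _ (by omega)
    · have he : 2 * j + 1 - 1 = 2 * j := by omega
      rw [he]
      exact h1
    · exact h2
  simp only [Psym]
  rw [isSymN_odd _ (by omega : dlen n.toNat % 2 = 1)]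
  simp

theorem countP_small (a b : Int) (ha : 0 ≤ a) (hb : b ≤ 10) :
    (PySem.List.pyRange a b).countP Psym = 0 := by
  rw [List.countP_eq_zero]
  intro n hn
  rw [PySem.List.mem_pyRange_one] at hn
  have h2 : n.toNat < 10 := by omega
  simp only [Psym]
  rcases Nat.eq_zero_or_pos n.toNat with h0 | h0
  · rw [h0]
    decide
  · have hd : dlen n.toNat = 1 := by
      apply dlen_eq_of _ _ (by omega)
      · simpa using Nat.one_le_iff_ne_zero.mpr (by omega : n.toNat ≠ 0)
      · simpa using h2
    rw [isSymN_odd _ (by omega : dlen n.toNat % 2 = 1)]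
    simp

theorem Psym_row (m : Nat) (hm : 1 ≤ m) (L r : Int) (hL1 : (10:Int) ^ (m - 1) ≤ L)
    (hL2 : L < (10:Int) ^ m) (hr1 : 0 ≤ r) (hr2 : r < (10:Int) ^ m) :
    Psym (L * 10 ^ m + r) = (altDigsum 0 r == altDigsum 0 L) := by
  have hL0 : 0 ≤ L := le_trans (by positivity) hL1
  have hcm : (((10:Nat) ^ m : Nat) : Int) = (10:Int) ^ m := by push_cast; ring
  have hcm1 : (((10:Nat) ^ (m - 1) : Nat) : Int) = (10:Int) ^ (m - 1) := by push_cast; ring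
  have hK0 : 0 ≤ L * 10 ^ m + r := by positivity
  have hKnat : (L * 10 ^ m + r).toNat = 10 ^ m * L.toNat + r.toNat := by
    have h1 : (((10:Nat) ^ m * L.toNat + r.toNat : Nat) : Int) = L * 10 ^ m + r := by
      push_cast
      rw [Int.toNat_of_nonneg hL0, Int.toNat_of_nonneg hr1]
      ring
    omega
  have hb1 : 10 ^ (m - 1) ≤ L.toNat := by omega
  have hb2 : L.toNat < 10 ^ m := by omega
  have hb3 : r.toNat < 10 ^ m := by omega
  simp only [Psym]
  rw [hKnat, isSymN_row m L.toNat r.toNat hm hb1 hb2 hb3]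
  rw [altDigsum_eq 0 r hr1, altDigsum_eq 0 L hL0]
  by_cases h : natDS L.toNat = natDS r.toNat
  · simp [h]
  · simp [h]
    omega

theorem row_countP (m : Nat) (hm : 1 ≤ m) (L : Int) (hL1 : (10:Int) ^ (m - 1) ≤ L)
    (hL2 : L < (10:Int) ^ m) :
    (PySem.List.pyRange (L * 10 ^ m) ((L + 1) * 10 ^ m)).countP Psym
      = ((PySem.List.pyRange 0 ((10:Int) ^ m)).map (fun r => altDigsum 0 r)).count
          (altDigsum 0 L) := by
  have hsplit : (L + 1) * (10:Int) ^ m = L * 10 ^ m + 10 ^ m := by ring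
  rw [hsplit, pyRange_shift (L * 10 ^ m) ((10:Int) ^ m), List.countP_map,
    List.count_eq_countP, List.countP_map]
  apply List.countP_congr
  intro r hr
  rw [PySem.List.mem_pyRange_one] at hr
  simp only [Function.comp]
  rw [Psym_row m hm L r hL1 hL2 hr.1 hr.2]

theorem rows_sum (m : Nat) (hm : 1 ≤ m) (t : Nat) : ∀ (u : Int),
    u = (10:Int) ^ (m - 1) + t → u ≤ (10:Int) ^ m →
    ((PySem.List.pyRange ((10:Int) ^ (m - 1)) u).map
        (fun L => (((PySem.List.pyRange 0 ((10:Int) ^ m)).map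
          (fun r => altDigsum 0 r)).count (altDigsum 0 L) : Int))).sum
      = ((PySem.List.pyRange ((10:Int) ^ (2 * m - 1)) (u * 10 ^ m)).countP Psym : Int) := by
  induction t with
  | zero =>
    intro u hu hu2
    have ha : (10:Int) ^ (m - 1) * 10 ^ m = 10 ^ (2 * m - 1) := by
      rw [← pow_add]
      congr 1
      omega
    have hu' : u = (10:Int) ^ (m - 1) := by simpa using hu
    rw [hu', ha, PySem.List.pyRange_one_eq_nil (le_refl ((10:Int) ^ (m - 1))),
      PySem.List.pyRange_one_eq_nil (le_refl ((10:Int) ^ (2 * m - 1)))]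
    simp
  | succ t ih =>
    intro u hu hu2
    have hl0 : (10:Int) ^ (m - 1) ≤ u - 1 := by omega
    have hstep : PySem.List.pyRange ((10:Int) ^ (m - 1)) u
        = PySem.List.pyRange ((10:Int) ^ (m - 1)) (u - 1) ++ [u - 1] := by
      have h := PySem.List.pyRange_one_succ_right (a := (10:Int) ^ (m - 1)) (b := u - 1) hl0
      simpa using h
    have ha : (10:Int) ^ (m - 1) * 10 ^ m = 10 ^ (2 * m - 1) := by
      rw [← pow_add]
      congr 1
      omega
    have hmul1 : (10:Int) ^ (2 * m - 1) ≤ (u - 1) * 10 ^ m := by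
      rw [← ha]
      apply mul_le_mul_of_nonneg_right hl0 (by positivity)
    have hmul2 : (u - 1) * (10:Int) ^ m ≤ u * 10 ^ m := by
      apply mul_le_mul_of_nonneg_right (by omega) (by positivity)
    have hrsplit : PySem.List.pyRange ((10:Int) ^ (2 * m - 1)) (u * 10 ^ m)
        = PySem.List.pyRange ((10:Int) ^ (2 * m - 1)) ((u - 1) * 10 ^ m)
          ++ PySem.List.pyRange ((u - 1) * 10 ^ m) (u * 10 ^ m) := by
      exact PySem.List.pyRange_one_append _ _ _ hmul1 hmul2
    rw [hstep, hrsplit, List.map_append, List.sum_append, List.countP_append]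
    rw [ih (u - 1) (by omega) (by omega)]
    have hrow : PySem.List.pyRange ((u - 1) * (10:Int) ^ m) (u * 10 ^ m)
        = PySem.List.pyRange ((u - 1) * (10:Int) ^ m) (((u - 1) + 1) * 10 ^ m) := by
      congr 1
      ring
    rw [hrow, row_countP m hm (u - 1) hl0 (by omega)]
    push_cast
    simp

-- the per-block work of altBlocks equals the count of symmetric numbers of the block
theorem gap_countP (x : Int) (m : Nat) (hm : 1 ≤ m) (hx : (10:Int) ^ (2 * m - 1) ≤ x) :
    (PySem.List.pyRange (min x ((10:Int) ^ m * 10 ^ m - 1) + 1) (x + 1)).countP Psym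
      = (PySem.List.pyRange ((10:Int) ^ (2 * m + 1)) (x + 1)).countP Psym := by
  have hbb : (10:Int) ^ m * 10 ^ m = 10 ^ (2 * m) := by
    rw [← pow_add]
    congr 1
    omega
  have hzz : (10:Int) ^ (2 * m) ≤ 10 ^ (2 * m + 1) := by
    apply pow_le_pow_right₀ (by norm_num)
    omega
  by_cases hxb : x ≤ 10 ^ m * 10 ^ m - 1
  · have hy : min x ((10:Int) ^ m * 10 ^ m - 1) = x := min_eq_left hxb
    rw [hy, PySem.List.pyRange_one_eq_nil (le_refl (x + 1)),
      PySem.List.pyRange_one_eq_nil (by rw [hbb] at hxb; omega)]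
  · have hy : min x ((10:Int) ^ m * 10 ^ m - 1) = 10 ^ m * 10 ^ m - 1 :=
      min_eq_right (by omega)
    rw [hy]
    have hstart : (10:Int) ^ m * 10 ^ m - 1 + 1 = 10 ^ (2 * m) := by rw [hbb]; ring
    rw [hstart]
    by_cases hxc : x + 1 ≤ 10 ^ (2 * m + 1)
    · rw [PySem.List.pyRange_one_eq_nil hxc,
        countP_zone m _ _ (le_refl _) (by omega)]
      simp
    · rw [PySem.List.pyRange_one_append ((10:Int) ^ (2 * m)) ((10:Int) ^ (2 * m + 1)) (x + 1)
        hzz (by omega), List.countP_append,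
        countP_zone m _ _ (le_refl _) (le_refl _)]
      simp

theorem altBlocks_go (fuel : Nat) : ∀ (x : Int) (m : Nat) (total : Int), 1 ≤ m →
    (x + 1 - 10 ^ (2 * m - 1)).toNat ≤ fuel →
    altBlocks x m total
      = total + ((PySem.List.pyRange ((10:Int) ^ (2 * m - 1)) (x + 1)).countP Psym : Int) := by
  induction fuel with
  | zero =>
    intro x m total hm hf
    have hng : ¬ (10:Int) ^ (2 * m - 1) ≤ x := by
      intro h
      omega
    rw [altBlocks, dif_neg hng, PySem.List.pyRange_one_eq_nil (by omega)]
    simp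
  | succ fuel ih =>
    intro x m total hm hf
    by_cases h : (10:Int) ^ (2 * m - 1) ≤ x
    case neg =>
      rw [altBlocks, dif_neg h, PySem.List.pyRange_one_eq_nil (by omega)]
      simp
    case pos =>
      rw [altBlocks, dif_pos h]
      dsimp only
      set y := min x ((10:Int) ^ m * 10 ^ m - 1) with hydef
      have hhalf : (0:Int) < 10 ^ m := by positivity
      have hsplitpow : (10:Int) ^ (2 * m - 1) = 10 ^ (m - 1) * 10 ^ m := by
        rw [← pow_add]
        congr 1
        omega
      have hbb : (10:Int) ^ m * 10 ^ m = 10 ^ (2 * m) := by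
        rw [← pow_add]
        congr 1
        omega
      have hapow : (10:Int) ^ (2 * m - 1) < 10 ^ (2 * m) := by
        apply pow_lt_pow_right₀ (by norm_num)
        omega
      have hy1 : (10:Int) ^ (2 * m - 1) ≤ y := by
        apply le_min h
        rw [hbb]
        omega
      have hy0 : (0:Int) ≤ y := by
        have h0 : (0:Int) < 10 ^ (2 * m - 1) := by positivity
        omega
      have hyx : y ≤ x := min_le_left _ _
      have hyb : y ≤ 10 ^ m * 10 ^ m - 1 := min_le_right _ _
      set lmax := y / 10 ^ m with hlmaxdef
      have hfd : PySem.Int.floordiv y (10 ^ m) = lmax := by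
        simp only [PySem.Int.floordiv]
        rw [Int.fdiv_eq_ediv]
        simp
        exact hlmaxdef.symm
      have hmd : PySem.Int.mod y (10 ^ m) = y % 10 ^ m := by
        simp only [PySem.Int.mod]
        rw [Int.fmod_eq_emod]
        simp
      have hfd10 : PySem.Int.floordiv ((10:Int) ^ m) 10 = 10 ^ (m - 1) := by
        have hpm : (10:Int) ^ m = 10 ^ (m - 1) * 10 := by
          rw [← pow_succ]
          congr 1
          omega
        simp only [PySem.Int.floordiv]
        rw [Int.fdiv_eq_ediv]
        rw [hpm]
        simp [Int.mul_ediv_cancel]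
      have hlmax1 : (10:Int) ^ (m - 1) ≤ lmax := by
        rw [hlmaxdef, Int.le_ediv_iff_mul_le hhalf]
        rw [← hsplitpow]
        exact hy1
      have hlmax2 : lmax < 10 ^ m := by
        rw [hlmaxdef, Int.ediv_lt_iff_lt_mul hhalf]
        omega
      have hlmul : lmax * 10 ^ m ≤ y := Int.ediv_mul_le y (ne_of_gt hhalf)
      have hmodlt : y % 10 ^ m < 10 ^ m := Int.emod_lt_of_pos y hhalf
      have hmod0 : 0 ≤ y % 10 ^ m := Int.emod_nonneg y (ne_of_gt hhalf)
      have hdm : lmax * 10 ^ m + (y % 10 ^ m + 1) = y + 1 := by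
        have h1 : 10 ^ m * (y / 10 ^ m) + y % 10 ^ m = y := Int.ediv_add_emod y (10 ^ m)
        rw [← hlmaxdef] at h1
        calc lmax * 10 ^ m + (y % 10 ^ m + 1) = 10 ^ m * lmax + y % 10 ^ m + 1 := by ring
          _ = y + 1 := by rw [h1]
      -- the tally dictionary
      have hbySum : ∀ v : Int,
          (((PySem.List.pyRange 0 ((10:Int) ^ m)).foldl
            (fun d r => d.insert (altDigsum 0 r) (d.getD (altDigsum 0 r) 0 + 1))
            (PySem.Dict.empty : PySem.Dict Int Int)).getD v 0)
          = (((PySem.List.pyRange 0 ((10:Int) ^ m)).map (fun r => altDigsum 0 r)).count v : Int) := by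
        intro v
        have hd := PySem.Dict.getD_foldl_insert_add_one
          ((PySem.List.pyRange 0 ((10:Int) ^ m)).map (fun r => altDigsum 0 r))
          (PySem.Dict.empty : PySem.Dict Int Int) v
        rw [List.foldl_map] at hd
        rw [hd]
        simp
      -- full rows
      have hrows : ((PySem.List.pyRange ((10:Int) ^ (m - 1)) lmax).foldl
          (fun t left => t + (((PySem.List.pyRange 0 ((10:Int) ^ m)).foldl
            (fun d r => d.insert (altDigsum 0 r) (d.getD (altDigsum 0 r) 0 + 1))
            (PySem.Dict.empty : PySem.Dict Int Int)).getD (altDigsum 0 left) 0)) total)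
          = total + ((PySem.List.pyRange ((10:Int) ^ (2 * m - 1)) (lmax * 10 ^ m)).countP Psym : Int) := by
        rw [PySem.List.foldl_add]
        congr 1
        have hmapeq : ((PySem.List.pyRange ((10:Int) ^ (m - 1)) lmax).map
            (fun left => (((PySem.List.pyRange 0 ((10:Int) ^ m)).foldl
              (fun d r => d.insert (altDigsum 0 r) (d.getD (altDigsum 0 r) 0 + 1))
              (PySem.Dict.empty : PySem.Dict Int Int)).getD (altDigsum 0 left) 0)))
            = ((PySem.List.pyRange ((10:Int) ^ (m - 1)) lmax).map
              (fun L => (((PySem.List.pyRange 0 ((10:Int) ^ m)).map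
                (fun r => altDigsum 0 r)).count (altDigsum 0 L) : Int))) := by
          apply List.map_congr_left
          intro L _
          exact hbySum (altDigsum 0 L)
        rw [hmapeq, rows_sum m hm (lmax - 10 ^ (m - 1)).toNat lmax (by omega) (by omega)]
      -- partial row
      have hpart : ∀ t0 : Int, ((PySem.List.pyRange 0 (y % 10 ^ m + 1)).foldl
          (fun t r => if altDigsum 0 r == altDigsum 0 lmax then t + 1 else t) t0)
          = t0 + ((PySem.List.pyRange (lmax * 10 ^ m) (y + 1)).countP Psym : Int) := by
        intro t0
        rw [PySem.List.foldl_if_add_one]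
        congr 2
        rw [← hdm, pyRange_shift (lmax * 10 ^ m) (y % 10 ^ m + 1), List.countP_map]
        symm
        apply List.countP_congr
        intro r hr
        rw [PySem.List.mem_pyRange_one] at hr
        simp only [Function.comp]
        rw [Psym_row m hm lmax r hlmax1 hlmax2 hr.1 (by omega)]
      rw [hmd, hfd, hfd10, hrows, hpart]
      rw [ih x (m + 1) _ (by omega) (by
        have hgrow : (10:Int) ^ (2 * m - 1) < 10 ^ (2 * (m + 1) - 1) := by
          apply pow_lt_pow_right₀ (by norm_num)
          omega
        omega)]
      -- assemble the right-hand side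
      have hsplit1 : PySem.List.pyRange ((10:Int) ^ (2 * m - 1)) (x + 1)
          = PySem.List.pyRange ((10:Int) ^ (2 * m - 1)) (lmax * 10 ^ m)
            ++ PySem.List.pyRange (lmax * 10 ^ m) (y + 1)
            ++ PySem.List.pyRange (y + 1) (x + 1) := by
        rw [← PySem.List.pyRange_one_append ((10:Int) ^ (2 * m - 1)) (lmax * 10 ^ m) (y + 1)
          (by rw [hsplitpow]; exact mul_le_mul_of_nonneg_right hlmax1 (le_of_lt hhalf)) (by omega)]
        rw [← PySem.List.pyRange_one_append ((10:Int) ^ (2 * m - 1)) (y + 1) (x + 1)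
          (by omega) (by omega)]
      rw [hsplit1, List.countP_append, List.countP_append]
      have hgap := gap_countP x m hm h
      rw [← hydef] at hgap
      rw [hgap, show 2 * (m + 1) - 1 = 2 * m + 1 by omega]
      push_cast
      ring

theorem altBlocks_eq (x : Int) (m : Nat) (hm : 1 ≤ m) (total : Int) :
    altBlocks x m total
      = total + ((PySem.List.pyRange ((10:Int) ^ (2 * m - 1)) (x + 1)).countP Psym : Int) := by
  exact altBlocks_go (x + 1 - 10 ^ (2 * m - 1)).toNat x m total hm (le_refl _)

theorem altCountUpto_eq (x : Int) :
    altCountUpto x = ((PySem.List.pyRange 0 (x + 1)).countP Psym : Int) := by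
  unfold altCountUpto
  rw [altBlocks_eq x 1 (by norm_num) 0]
  norm_num
  by_cases h : 10 ≤ x + 1
  · rw [PySem.List.pyRange_one_append 0 10 (x + 1) (by norm_num) h, List.countP_append,
      countP_small 0 10 (by norm_num) (by norm_num)]
    norm_num
  · rw [PySem.List.pyRange_one_eq_nil (b := x + 1) (by omega),
      countP_small 0 (x + 1) (by norm_num) (by omega)]
    simp

-- ===== VERDICT (by name: the statement is the Claim_ definition above) =====
theorem neg_admitted (low high n : Int) (hdom : Dom_sym low high) (hpre : Pre_sym low high)
    (h1 : low ≤ n) (h2 : n ≤ high) (h3 : n < 0) : symTest n = false := by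
  apply symTest_neg_even n h3
  obtain ⟨p1, p2, p3, p4, p5⟩ := hpre
  have hdom' : -2147483648 ≤ low ∧ low ≤ 2147483648 ∧ -2147483648 ≤ high ∧ high ≤ 2147483648 := by
    unfold Dom_sym pvDomInt at hdom
    simp at hdom
    omega
  have hk1 : 1 ≤ n.natAbs := by omega
  have hk2 : n.natAbs < 10 ^ 10 := by
    have : (10:Nat) ^ 10 = 10000000000 := by norm_num
    omega
  have hub : dlen n.natAbs ≤ 10 := (dlen_le_iff _ 10).mpr hk2
  have hd1 : 0 < dlen n.natAbs := dlen_pos _ (by omega)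
  by_contra hodd
  have hoddd : dlen n.natAbs % 2 = 1 := by omega
  have hlb := dlen_pow_le n.natAbs (by omega)
  have hlt := dlen_lt n.natAbs
  have hdv : dlen n.natAbs = 1 ∨ dlen n.natAbs = 3 ∨ dlen n.natAbs = 5 ∨
      dlen n.natAbs = 7 ∨ dlen n.natAbs = 9 := by omega
  rcases hdv with hd | hd | hd | hd | hd <;>
    rw [hd] at hlb hlt <;> norm_num at hlb hlt
  · exact p1 ⟨by omega, by omega, by omega⟩
  · exact p2 ⟨by omega, by omega, by omega⟩
  · exact p3 ⟨by omega, by omega, by omega⟩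
  · exact p4 ⟨by omega, by omega, by omega⟩
  · exact p5 ⟨by omega, by omega, by omega⟩

theorem sym_spec : Claim_equal_sym := by
  intro low high hdom hpre
  unfold Spec_sym sym_alt
  rw [sym_eq_countP]
  by_cases hlh : high < low
  · rw [if_pos hlh, PySem.List.pyRange_one_eq_nil (by omega)]
    simp
  · rw [if_neg hlh, altCountUpto_eq high, altCountUpto_eq (max low 0 - 1),
      show max low 0 - 1 + 1 = max low 0 by ring]
    by_cases hh0 : high < 0
    · have hmx : max low 0 = 0 := by omega
      have hA : (PySem.List.pyRange low (high + 1)).countP symTest = 0 := by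
        rw [List.countP_eq_zero]
        intro n hn
        rw [PySem.List.mem_pyRange_one] at hn
        rw [neg_admitted low high n hdom hpre hn.1 (by omega) (by omega)]
        simp
      rw [hA, hmx, PySem.List.pyRange_one_eq_nil (by omega : high + 1 ≤ 0),
        PySem.List.pyRange_one_eq_nil (le_refl (0:Int))]
      simp
    · have hlo1 : (0:Int) ≤ max low 0 := le_max_right _ _
      have hlo2 : max low 0 ≤ high + 1 := by omega
      rw [PySem.List.pyRange_one_append 0 (max low 0) (high + 1) hlo1 hlo2, List.countP_append]
      have hposcongr : ∀ a : Int, 0 ≤ a →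
          (PySem.List.pyRange a (high + 1)).countP symTest
            = (PySem.List.pyRange a (high + 1)).countP Psym := by
        intro a ha
        apply List.countP_congr
        intro n hn
        rw [PySem.List.mem_pyRange_one] at hn
        have he : symTest n = Psym n := by
          rw [symTest_pos n (by omega)]
          rfl
        rw [he]
      have hL : (PySem.List.pyRange low (high + 1)).countP symTest
          = (PySem.List.pyRange (max low 0) (high + 1)).countP Psym := by
        by_cases hl0 : 0 ≤ low
        · have hmx : max low 0 = low := by omega
          rw [hmx, hposcongr low hl0]
        · have hmx : max low 0 = 0 := by omega
          rw [hmx, PySem.List.pyRange_one_append low 0 (high + 1) (by omega) (by omega),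
            List.countP_append]
          have hneg : (PySem.List.pyRange low 0).countP symTest = 0 := by
            rw [List.countP_eq_zero]
            intro n hn
            rw [PySem.List.mem_pyRange_one] at hn
            rw [neg_admitted low high n hdom hpre hn.1 (by omega) (by omega)]
            simp
          rw [hneg, hposcongr 0 (le_refl _)]
          simp
      rw [hL]
      push_cast
      ring
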